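-- pv_equiv track=rewrite | github.com/fiona-meng/Data-Structures-and-Algorithms | midterm_review.py | remove_all_evens
-- ===== SOURCE A (Python) =====
-- def remove_all_evens(lst):
--     last_even = 0
--     for i in range(len(lst)):
--         if lst[i] % 2 != 0:
--             lst[i], lst[last_even] = lst[last_even], lst[i]
--             last_even += 1
--     for i in range(last_even, len(lst)):
--         lst.pop()
--     return lst
-- ===== SOURCE B (Python) =====
-- def remove_all_evens(lst):
--     lst[:] = [x for x in lst if x % 2 != 0]
--     return lst
-- ===== Notes on version B (the rewrite author's own statement) =====
-- stated objective: simpler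
-- what changed: Replaces the two-pointer swap-partition plus trailing pop loop with a single filter comprehension assigned back over the list via slice assignment (same in-place mutation, odd order preserved).
import Mathlib
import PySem

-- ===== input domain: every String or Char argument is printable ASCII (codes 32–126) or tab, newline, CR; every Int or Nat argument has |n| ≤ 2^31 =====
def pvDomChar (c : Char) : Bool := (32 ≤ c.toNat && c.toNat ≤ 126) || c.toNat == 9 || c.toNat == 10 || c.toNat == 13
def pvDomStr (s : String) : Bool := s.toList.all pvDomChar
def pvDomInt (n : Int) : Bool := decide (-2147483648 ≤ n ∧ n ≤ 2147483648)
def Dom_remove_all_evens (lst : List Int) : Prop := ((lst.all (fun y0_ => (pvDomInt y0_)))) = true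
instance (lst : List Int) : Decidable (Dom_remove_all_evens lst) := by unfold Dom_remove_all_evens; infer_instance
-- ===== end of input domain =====

-- B replaces A's two-pointer swap-partition + pop loop with one filter rebuild (simpler).
-- Both Pythons mutate `lst` in place identically (final contents = return value); the
-- theorems below are about the returned value.

-- ===== PORT A =====
-- the first for-loop: fuel counts the remaining iterations (len - i); indices i and
-- last_even are always in range (last_even ≤ i < cur.length), so getD 0 is exact here
def pvALoop (fuel i le : Nat) (cur : List Int) : List Int × Nat :=
  match fuel with
  | 0 => (cur, le)
  | k + 1 =>
    let x := cur.getD i 0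
    if PySem.Int.mod x 2 != 0 then
      let y := cur.getD le 0
      -- lst[i], lst[last_even] = lst[last_even], lst[i]
      pvALoop k (i + 1) (le + 1) ((cur.set i y).set le x)
    else
      pvALoop k (i + 1) le cur

-- the second for-loop: range(last_even, len(lst)) has len - last_even iterations,
-- each doing lst.pop() (last_even ≤ len, so the list is never empty when popped)
def pvPopLoop (k : Nat) (cur : List Int) : List Int :=
  match k with
  | 0 => cur
  | j + 1 => pvPopLoop j cur.dropLast

def remove_all_evens (lst : List Int) : List Int :=
  let r := pvALoop lst.length 0 0 lst
  pvPopLoop (lst.length - r.2) r.1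

-- ===== PORT B =====
def remove_all_evens_alt (lst : List Int) : List Int :=
  lst.filter (fun x => PySem.Int.mod x 2 != 0)

-- ===== PRECONDITION & SPEC =====
def Spec_remove_all_evens (lst : List Int) (out : List Int) : Prop := out = remove_all_evens_alt lst
instance (lst : List Int) (out : List Int) : Decidable (Spec_remove_all_evens lst out) := by unfold Spec_remove_all_evens; infer_instance

-- ===== CLAIM (what is proved, stated in full; the proofs are below) =====
def Claim_equal_remove_all_evens : Prop := ∀ (lst : List Int), Dom_remove_all_evens lst → Spec_remove_all_evens lst (remove_all_evens lst)

-- ===== LEMMAS AND PROOFS =====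

theorem pvPopLoop_take (k : Nat) (cur : List Int) :
    pvPopLoop k cur = cur.take (cur.length - k) := by
  induction k generalizing cur with
  | zero => simp [pvPopLoop]
  | succ j ih =>
    rw [pvPopLoop, ih, List.dropLast_eq_take, List.take_take, List.length_take]
    congr 1
    omega

theorem pvALoop_inv (k : Nat) :
    ∀ (i le : Nat) (cur lst : List Int),
      cur.length = lst.length → i + k = lst.length → le ≤ i →
      cur.take le = (lst.take i).filter (fun x => PySem.Int.mod x 2 != 0) →
      cur.drop i = lst.drop i →
      (pvALoop k i le cur).1.length = lst.length ∧
      (pvALoop k i le cur).2 ≤ lst.length ∧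
      (pvALoop k i le cur).1.take (pvALoop k i le cur).2
        = lst.filter (fun x => PySem.Int.mod x 2 != 0) := by
  induction k with
  | zero =>
    intro i le cur lst hlen hik hle htake hdrop
    have hi : i = lst.length := by omega
    subst hi
    simp [pvALoop]
    refine ⟨hlen, by omega, ?_⟩
    simpa using htake
  | succ k ih =>
    intro i le cur lst hlen hik hle htake hdrop
    have hi : i < lst.length := by omega
    have hic : i < cur.length := by omega
    have hgetq : cur[i]? = lst[i]? := by
      have h0 : (cur.drop i)[0]? = (lst.drop i)[0]? := by rw [hdrop]
      simpa [List.getElem?_drop] using h0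
    have hget : cur[i] = lst[i] := by
      have := hgetq
      rw [List.getElem?_eq_getElem hic, List.getElem?_eq_getElem hi] at this
      exact Option.some.inj this
    have hgd : cur.getD i 0 = lst[i] := by
      rw [List.getD_eq_getElem?_getD, hgetq, List.getElem?_eq_getElem hi]; rfl
    have hsplit : lst.take (i + 1) = lst.take i ++ [lst[i]] := by
      rw [List.take_add_one, List.getElem?_eq_getElem hi]
      simp only [Option.toList_some]
    rw [pvALoop]
    simp only [hgd]
    by_cases hodd : PySem.Int.mod lst[i] 2 != 0
    · simp only [hodd, if_pos]
      set cur' := (cur.set i (cur.getD le 0)).set le lst[i] with hc'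
      have hlen' : cur'.length = lst.length := by simp [hc', hlen]
      have hlec : le < cur.length := by omega
      -- elements strictly below le are untouched
      have hbelow : ∀ j, j < le → cur'[j]? = cur[j]? := by
        intro j hj
        rw [hc']
        rw [List.getElem?_set_ne (by omega), List.getElem?_set_ne (by omega)]
      have htake' : cur'.take (le + 1)
          = (lst.take (i + 1)).filter (fun x => PySem.Int.mod x 2 != 0) := by
        have hatle : cur'[le]? = some lst[i] := by
          rw [hc', List.getElem?_set_self (by simpa using hlec)]
        have htl : cur'.take le = cur.take le := by
          apply List.ext_getElem?
          intro j
          by_cases hj : j < le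
          · rw [List.getElem?_take_of_lt hj, List.getElem?_take_of_lt hj, hbelow j hj]
          · rw [List.getElem?_eq_none (by simp; omega), List.getElem?_eq_none (by simp; omega)]
        have h1 : cur'.take (le + 1) = cur'.take le ++ [lst[i]] := by
          rw [List.take_add_one, hatle]
          rfl
        rw [h1, htl, htake, hsplit, List.filter_append,
          List.filter_cons_of_pos (p := fun x => PySem.Int.mod x 2 != 0) hodd,
          List.filter_nil]
      have hdrop' : cur'.drop (i + 1) = lst.drop (i + 1) := by
        apply List.ext_getElem?
        intro j
        rw [List.getElem?_drop, List.getElem?_drop]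
        have h1 : cur'[i + 1 + j]? = cur[i + 1 + j]? := by
          rw [hc', List.getElem?_set_ne (by omega), List.getElem?_set_ne (by omega)]
        rw [h1]
        have h2 : (cur.drop i)[1 + j]? = (lst.drop i)[1 + j]? := by rw [hdrop]
        rw [List.getElem?_drop, List.getElem?_drop] at h2
        rw [show i + 1 + j = i + (1 + j) by omega, h2]
      exact ih (i + 1) (le + 1) cur' lst hlen' (by omega) (by omega) htake' hdrop'
    · simp only [hodd, if_neg, Bool.false_eq_true, not_false_iff]
      have htake' : cur.take le
          = (lst.take (i + 1)).filter (fun x => PySem.Int.mod x 2 != 0) := by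
        rw [htake, hsplit, List.filter_append,
          List.filter_cons_of_neg (p := fun x => PySem.Int.mod x 2 != 0) hodd,
          List.filter_nil, List.append_nil]
      have hdrop' : cur.drop (i + 1) = lst.drop (i + 1) := by
        have h2 : (cur.drop i).drop 1 = (lst.drop i).drop 1 := by rw [hdrop]
        simpa [List.drop_drop, Nat.add_comm] using h2
      exact ih (i + 1) le cur lst hlen (by omega) (by omega) htake' hdrop'

-- ===== VERDICT (by name: the statement is the Claim_ definition above) =====
theorem remove_all_evens_spec : Claim_equal_remove_all_evens := by
  intro lst _
  unfold Spec_remove_all_evens remove_all_evens remove_all_evens_alt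
  obtain ⟨hlen, hle, htake⟩ :=
    pvALoop_inv lst.length 0 0 lst lst rfl (by omega) (by omega) (by simp) (by simp)
  rw [pvPopLoop_take, hlen]
  rw [show lst.length - (lst.length - (pvALoop lst.length 0 0 lst).2)
        = (pvALoop lst.length 0 0 lst).2 by omega]
  exact htake
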